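-- pv_equiv track=rewrite | github.com/valory-xyz/optimus | packages/valory/skills/liquidity_trader_abci/utils/protocol_validation.py | validate_and_fix_protocols
-- ===== SOURCE A (Python) =====
-- from typing import List, Optional
--
-- def validate_and_fix_protocols(
--     selected_protocols: List[str],
--     target_investment_chains: List[str],
--     available_strategies: dict,
--     previous_protocols: Optional[List[str]] = None,
-- ) -> List[str]:
--     """Validate selected protocols and fix invalid ones without resetting to defaults.
--
--     Args:
--         selected_protocols: List of protocol names to validate
--         target_investment_chains: List of chains to check availability on
--         available_strategies: Dictionary mapping chains to available strategies
--         previous_protocols: Optional list of previously selected protocols to preserve (grandfathering)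
--
--     Returns:
--         List of validated protocol names
--     """
--     # Valid protocol names
--     # Note: uniswapV3 is kept here for grandfathering existing users, but it's removed from
--     # available_strategies and chat UI prompts. New users won't get it, but existing users
--     # who already have it selected will keep it when changing strategies.
--     VALID_PROTOCOLS = {
--         "balancerPool": "balancer_pools_search",
--         "uniswapV3": "uniswap_pools_search",  # Deprecated for new users, kept for grandfathering
--         "velodrome": "velodrome_pools_search",
--         "sturdy": "asset_lending",
--     }
--
--     # Normalize previous_protocols to a set for easy lookup
--     previous_protocols_set = set(previous_protocols) if previous_protocols else set()
--
--     # Check if any protocol is invalid or not available on selected chains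
--     invalid_protocols = []
--     valid_protocols = []
--     chain_incompatible_protocols = []
--
--     for protocol in selected_protocols:
--         if protocol not in VALID_PROTOCOLS:
--             invalid_protocols.append(protocol)
--             continue
--
--         # Check if protocol is available on ANY of the target chains
--         protocol_available = False
--         for chain in target_investment_chains:
--             if chain in available_strategies:
--                 chain_strategies = available_strategies[chain]
--                 strategy_name = VALID_PROTOCOLS[protocol]
--                 if strategy_name in chain_strategies:
--                     protocol_available = True
--                     break
--
--         if protocol_available:
--             valid_protocols.append(protocol)
--         else:
--             # If protocol is not available but was previously selected, preserve it (grandfathering)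
--             if protocol in previous_protocols_set:
--                 valid_protocols.append(protocol)
--             else:
--                 chain_incompatible_protocols.append(protocol)
--
--     # If any invalid or incompatible protocols found, get fallback protocols
--     if invalid_protocols or chain_incompatible_protocols:
--         # Get default protocols for all target chains as fallback
--         default_protocols = []
--         for chain in target_investment_chains:
--             if chain in available_strategies:
--                 chain_strategies = available_strategies[chain]
--                 # Convert strategies to protocol names
--                 for strategy in chain_strategies:
--                     for protocol, strategy_name in VALID_PROTOCOLS.items():
--                         if strategy == strategy_name:
--                             if protocol not in default_protocols:
--                                 default_protocols.append(protocol)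
--
--         # If we have valid protocols, keep them - don't add defaults unless ALL are invalid
--         if valid_protocols:
--             return valid_protocols
--         else:
--             # Only if ALL protocols are invalid, use defaults
--             return default_protocols
--
--     return valid_protocols
-- ===== SOURCE B (Python) =====
-- from typing import List, Optional
--
-- def validate_and_fix_protocols(
--     selected_protocols: List[str],
--     target_investment_chains: List[str],
--     available_strategies: dict,
--     previous_protocols: Optional[List[str]] = None,
-- ) -> List[str]:
--     """Validate selected protocols against chain availability, with grandfathering
--     and fallback to defaults, via an inverted strategy->protocol index and one
--     precomputed availability set."""
--     VALID_PROTOCOLS = {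
--         "balancerPool": "balancer_pools_search",
--         "uniswapV3": "uniswap_pools_search",
--         "velodrome": "velodrome_pools_search",
--         "sturdy": "asset_lending",
--     }
--     strategy_to_protocol = {s: p for p, s in VALID_PROTOCOLS.items()}
--     previous_set = set(previous_protocols or [])
--
--     # Protocols available on at least one target chain (computed once).
--     available_protocols = set()
--     for chain in target_investment_chains:
--         for strategy in available_strategies.get(chain, ()):
--             protocol = strategy_to_protocol.get(strategy)
--             if protocol is not None:
--                 available_protocols.add(protocol)
--
--     valid_protocols = []
--     any_bad = False
--     for protocol in selected_protocols:
--         if protocol not in VALID_PROTOCOLS: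
--             any_bad = True
--         elif protocol in available_protocols or protocol in previous_set:
--             valid_protocols.append(protocol)
--         else:
--             any_bad = True
--
--     if not any_bad or valid_protocols:
--         return valid_protocols
--
--     # All selected protocols were rejected: fall back to defaults, deduplicated
--     # in chain-then-strategy order.
--     seen = set()
--     default_protocols = []
--     for chain in target_investment_chains:
--         for strategy in available_strategies.get(chain, ()):
--             protocol = strategy_to_protocol.get(strategy)
--             if protocol is not None and protocol not in seen:
--                 seen.add(protocol)
--                 default_protocols.append(protocol)
--     return default_protocols
-- ===== Notes on version B (the rewrite author's own statement) =====
-- stated objective: alternative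
-- what changed: Replaced A's per-protocol rescan of all chains and per-strategy scan of VALID_PROTOCOLS.items() with a strategy->protocol inverted dict, one precomputed set of chain-available protocols, and a single classifying pass that keeps only (valid_protocols, any_bad) instead of three lists.
import Mathlib
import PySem

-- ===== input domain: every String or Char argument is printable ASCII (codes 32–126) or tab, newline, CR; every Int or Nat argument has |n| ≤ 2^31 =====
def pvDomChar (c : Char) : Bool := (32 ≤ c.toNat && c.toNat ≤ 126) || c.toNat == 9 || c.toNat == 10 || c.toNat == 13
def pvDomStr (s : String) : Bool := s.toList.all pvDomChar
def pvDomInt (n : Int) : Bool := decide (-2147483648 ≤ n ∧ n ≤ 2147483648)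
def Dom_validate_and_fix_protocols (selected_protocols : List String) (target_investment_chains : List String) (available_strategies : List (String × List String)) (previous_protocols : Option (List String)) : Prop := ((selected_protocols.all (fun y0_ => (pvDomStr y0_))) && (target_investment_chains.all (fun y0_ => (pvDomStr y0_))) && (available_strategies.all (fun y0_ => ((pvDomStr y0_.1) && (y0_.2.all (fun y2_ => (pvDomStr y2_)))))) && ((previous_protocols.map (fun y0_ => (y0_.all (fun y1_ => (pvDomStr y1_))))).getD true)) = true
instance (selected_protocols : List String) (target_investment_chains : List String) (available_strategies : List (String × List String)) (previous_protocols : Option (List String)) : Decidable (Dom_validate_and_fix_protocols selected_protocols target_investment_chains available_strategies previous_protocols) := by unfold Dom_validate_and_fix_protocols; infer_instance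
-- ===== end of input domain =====

-- B replaces A's per-protocol chain scan by one precomputed availability set (via an inverted
-- strategy->protocol dict) and a single classifying pass with a flag; same return value (alternative/simpler).

-- B replaces A's per-protocol chain scan and per-strategy scan of VALID_PROTOCOLS.items() by a
-- precomputed availability set built through an inverted strategy->protocol dict, plus a single
-- classifying pass keeping only (valid, any_bad); same return value (objective: alternative).

-- ===== PORT A =====
-- VALID_PROTOCOLS literal dict
def pvVALID : PySem.Dict String String := PySem.Dict.mk
  [("balancerPool", "balancer_pools_search"),
   ("uniswapV3", "uniswap_pools_search"),
   ("velodrome", "velodrome_pools_search"),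
   ("sturdy", "asset_lending")]

-- A's inner chain loop with break ("for chain in target_investment_chains: ... break")
def pvAvailLoopA (sname : String) (chains : List String) (avail : List (String × List String)) : Bool :=
  match chains with
  | [] => false
  | chain :: rest =>
    match List.lookup chain avail with
    | some cs => if cs.contains sname then true else pvAvailLoopA sname rest avail
    | none => pvAvailLoopA sname rest avail

-- A's classification loop, state = (invalid, valid, chain_incompatible)
def pvClassifyA (tc : List String) (avail : List (String × List String)) (prev : PySem.Set String)
    (sp : List String) (st : List String × List String × List String) :
    List String × List String × List String :=
  match sp with
  | [] => st
  | p :: rest =>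
    match pvVALID.get? p with
    | none => pvClassifyA tc avail prev rest (st.1 ++ [p], st.2.1, st.2.2)
    | some sname =>
      if pvAvailLoopA sname tc avail then
        pvClassifyA tc avail prev rest (st.1, st.2.1 ++ [p], st.2.2)
      else if prev.contains p then
        pvClassifyA tc avail prev rest (st.1, st.2.1 ++ [p], st.2.2)
      else
        pvClassifyA tc avail prev rest (st.1, st.2.1, st.2.2 ++ [p])

-- A's default_protocols loop (chain, then strategy, then VALID_PROTOCOLS.items())
def pvDefaultsA (tc : List String) (avail : List (String × List String)) : List String :=
  tc.foldl (fun acc chain =>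
    match List.lookup chain avail with
    | none => acc
    | some cs =>
      cs.foldl (fun acc s =>
        pvVALID.items.foldl (fun acc pr =>
          if s == pr.2 then (if acc.contains pr.1 then acc else acc ++ [pr.1]) else acc) acc) acc) []

def validate_and_fix_protocols (selected_protocols : List String) (target_investment_chains : List String) (available_strategies : List (String × List String)) (previous_protocols : Option (List String)) : List String :=
  let prevSet : PySem.Set String :=
    match previous_protocols with
    | some l => if l.isEmpty then PySem.Set.ofList ([] : List String) else PySem.Set.ofList l
    | none => PySem.Set.ofList ([] : List String)
  let st := pvClassifyA target_investment_chains available_strategies prevSet selected_protocols ([], [], [])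
  if !st.1.isEmpty || !st.2.2.isEmpty then
    if !st.2.1.isEmpty then st.2.1
    else pvDefaultsA target_investment_chains available_strategies
  else st.2.1

-- ===== PORT B =====
-- B's inverted index {strategy: protocol}
def pvSTP : PySem.Dict String String := PySem.Dict.mk
  [("balancer_pools_search", "balancerPool"),
   ("uniswap_pools_search", "uniswapV3"),
   ("velodrome_pools_search", "velodrome"),
   ("asset_lending", "sturdy")]

-- available_protocols: one pass over chains and their strategies
def pvAvailSetB (tc : List String) (avail : List (String × List String)) : PySem.Set String :=
  tc.foldl (fun s chain =>
    ((List.lookup chain avail).getD []).foldl (fun s strat =>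
      match pvSTP.get? strat with
      | some p => PySem.Set.add s p
      | none => s) s) PySem.Set.empty

-- B's classification pass, state = (valid_protocols, any_bad)
def pvClassifyB (availS prev : PySem.Set String) (sp : List String) (st : List String × Bool) :
    List String × Bool :=
  sp.foldl (fun st p =>
    if !pvVALID.contains p then (st.1, true)
    else if availS.contains p || prev.contains p then (st.1 ++ [p], st.2)
    else (st.1, true)) st

-- B's defaults with a 'seen' set, state = (seen, default_protocols)
def pvDefaultsB (tc : List String) (avail : List (String × List String)) : List String :=
  (tc.foldl (fun st chain =>
    ((List.lookup chain avail).getD []).foldl (fun (st : PySem.Set String × List String) strat =>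
      match pvSTP.get? strat with
      | some p => if st.1.contains p then st else (PySem.Set.add st.1 p, st.2 ++ [p])
      | none => st) st) (PySem.Set.empty, [])).2

def validate_and_fix_protocols_alt (selected_protocols : List String) (target_investment_chains : List String) (available_strategies : List (String × List String)) (previous_protocols : Option (List String)) : List String :=
  let prevSet : PySem.Set String := PySem.Set.ofList (previous_protocols.getD [])
  let availS := pvAvailSetB target_investment_chains available_strategies
  let st := pvClassifyB availS prevSet selected_protocols ([], false)
  if !st.2 || !st.1.isEmpty then st.1
  else pvDefaultsB target_investment_chains available_strategies

-- ===== PRECONDITION & SPEC =====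
def Spec_validate_and_fix_protocols (selected_protocols : List String) (target_investment_chains : List String) (available_strategies : List (String × List String)) (previous_protocols : Option (List String)) (out : List String) : Prop := out = validate_and_fix_protocols_alt selected_protocols target_investment_chains available_strategies previous_protocols
instance (selected_protocols : List String) (target_investment_chains : List String) (available_strategies : List (String × List String)) (previous_protocols : Option (List String)) (out : List String) : Decidable (Spec_validate_and_fix_protocols selected_protocols target_investment_chains available_strategies previous_protocols out) := by unfold Spec_validate_and_fix_protocols; infer_instance

-- ===== CLAIM (what is proved, stated in full; the proofs are below) =====
def Claim_equal_validate_and_fix_protocols : Prop := ∀ (selected_protocols : List String) (target_investment_chains : List String) (available_strategies : List (String × List String)) (previous_protocols : Option (List String)), Dom_validate_and_fix_protocols selected_protocols target_investment_chains available_strategies previous_protocols → Spec_validate_and_fix_protocols selected_protocols target_investment_chains available_strategies previous_protocols (validate_and_fix_protocols selected_protocols target_investment_chains available_strategies previous_protocols)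

-- ===== LEMMAS AND PROOFS =====

-- the two prev-set computations yield the same set
theorem prevSet_eq (pp : Option (List String)) :
    (match pp with
     | some l => if l.isEmpty then PySem.Set.ofList ([] : List String) else PySem.Set.ofList l
     | none => PySem.Set.ofList ([] : List String)) = PySem.Set.ofList (pp.getD []) := by
  cases pp with
  | none => rfl
  | some l => cases l <;> simp

theorem availLoopA_iff (sname : String) (chains : List String) (avail : List (String × List String)) :
    pvAvailLoopA sname chains avail = true ↔
      ∃ c ∈ chains, ∃ cs, List.lookup c avail = some cs ∧ sname ∈ cs := by
  induction chains with
  | nil => simp [pvAvailLoopA]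
  | cons c rest ih =>
    simp only [pvAvailLoopA]
    cases h : List.lookup c avail with
    | none =>
      rw [ih]
      constructor
      · rintro ⟨x, hx, cs, hcs, hm⟩; exact ⟨x, List.mem_cons_of_mem _ hx, cs, hcs, hm⟩
      · rintro ⟨x, hx, cs, hcs, hm⟩
        rcases List.mem_cons.mp hx with rfl | hx
        · rw [h] at hcs; cases hcs
        · exact ⟨x, hx, cs, hcs, hm⟩
    | some cs =>
      by_cases hm : sname ∈ cs
      · simp only [List.contains_eq_mem, hm, decide_true, if_true, true_iff]
        exact ⟨c, List.mem_cons_self, cs, h, hm⟩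
      · simp only [List.contains_eq_mem, hm, decide_false, Bool.false_eq_true, if_false]
        rw [ih]
        constructor
        · rintro ⟨x, hx, cs', hcs, hm'⟩; exact ⟨x, List.mem_cons_of_mem _ hx, cs', hcs, hm'⟩
        · rintro ⟨x, hx, cs', hcs, hm'⟩
          rcases List.mem_cons.mp hx with rfl | hx
          · rw [h] at hcs; cases hcs; exact absurd hm' hm
          · exact ⟨x, hx, cs', hcs, hm'⟩

theorem stp_inv (p sname : String) (h : pvVALID.get? p = some sname) (s : String) :
    pvSTP.get? s = some p ↔ s = sname := by
  simp only [pvVALID, PySem.Dict.get?_mk_cons] at h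
  simp only [pvSTP, PySem.Dict.get?_mk_cons]
  split_ifs at h <;> simp_all <;> subst_vars <;> split_ifs <;> simp_all [PySem.Dict.get?] <;> subst_vars <;> (try simp [eq_comm]) <;> (intro hh; subst hh; simp_all)

theorem mem_foldl_addOpt (f : String → Option String) (l : List String) (s : PySem.Set String) (p : String) :
    p ∈ l.foldl (fun s x => match f x with | some q => PySem.Set.add s q | none => s) s ↔
      p ∈ s ∨ ∃ x ∈ l, f x = some p := by
  induction l generalizing s with
  | nil => simp
  | cons x rest ih =>
    simp only [List.foldl_cons, ih]
    cases h : f x with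
    | none =>
      simp only [h, List.mem_cons]
      constructor
      · rintro (hs | ⟨y, hy, hf⟩)
        · exact Or.inl hs
        · exact Or.inr ⟨y, Or.inr hy, hf⟩
      · rintro (hs | ⟨y, hy | hy, hf⟩)
        · exact Or.inl hs
        · subst hy; rw [h] at hf; cases hf
        · exact Or.inr ⟨y, hy, hf⟩
    | some q =>
      simp only [h, PySem.Set.mem_add, List.mem_cons]
      constructor
      · rintro ((hs | rfl) | ⟨y, hy, hf⟩)
        · exact Or.inl hs
        · exact Or.inr ⟨x, Or.inl rfl, h⟩
        · exact Or.inr ⟨y, Or.inr hy, hf⟩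
      · rintro (hs | ⟨y, rfl | hy, hf⟩)
        · exact Or.inl (Or.inl hs)
        · rw [h] at hf; cases hf; exact Or.inl (Or.inr rfl)
        · exact Or.inr ⟨y, hy, hf⟩

theorem mem_availFoldB (avail : List (String × List String)) (tc : List String) (s : PySem.Set String) (p : String) :
    p ∈ tc.foldl (fun s chain =>
      ((List.lookup chain avail).getD []).foldl (fun s strat =>
        match pvSTP.get? strat with
        | some q => PySem.Set.add s q
        | none => s) s) s ↔
      p ∈ s ∨ ∃ c ∈ tc, ∃ st ∈ (List.lookup c avail).getD [], pvSTP.get? st = some p := by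
  induction tc generalizing s with
  | nil => simp
  | cons c rest ih =>
    simp only [List.foldl_cons, ih, mem_foldl_addOpt, List.mem_cons]
    constructor
    · rintro ((hs | ⟨y, hy, hf⟩) | ⟨x, hx, st, hst, hf⟩)
      · exact Or.inl hs
      · exact Or.inr ⟨c, Or.inl rfl, y, hy, hf⟩
      · exact Or.inr ⟨x, Or.inr hx, st, hst, hf⟩
    · rintro (hs | ⟨x, rfl | hx, st, hst, hf⟩)
      · exact Or.inl (Or.inl hs)
      · exact Or.inl (Or.inr ⟨st, hst, hf⟩)
      · exact Or.inr ⟨x, hx, st, hst, hf⟩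

theorem mem_availSetB (tc : List String) (avail : List (String × List String)) (p : String) :
    p ∈ pvAvailSetB tc avail ↔
      ∃ c ∈ tc, ∃ st ∈ (List.lookup c avail).getD [], pvSTP.get? st = some p := by
  unfold pvAvailSetB
  rw [mem_availFoldB]
  simp [PySem.Set.empty]

theorem avail_eq (p sname : String) (h : pvVALID.get? p = some sname)
    (tc : List String) (avail : List (String × List String)) :
    pvAvailLoopA sname tc avail = (pvAvailSetB tc avail).contains p := by
  rw [Bool.eq_iff_iff, availLoopA_iff, PySem.Set.contains_iff, mem_availSetB]
  apply exists_congr; intro c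
  apply and_congr_right; intro _
  cases hl : List.lookup c avail with
  | none => simp
  | some cs => simp [stp_inv p sname h]

theorem isEmpty_append_singleton {α : Type} (l : List α) (x : α) : (l ++ [x]).isEmpty = false := by
  cases l <;> rfl

theorem classify_rel (tc : List String) (avail : List (String × List String)) (prev : PySem.Set String)
    (sp : List String) (inv val inc : List String) :
    (pvClassifyA tc avail prev sp (inv, val, inc)).2.1 =
      (pvClassifyB (pvAvailSetB tc avail) prev sp (val, !inv.isEmpty || !inc.isEmpty)).1 ∧
    (!(pvClassifyA tc avail prev sp (inv, val, inc)).1.isEmpty ||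
     !(pvClassifyA tc avail prev sp (inv, val, inc)).2.2.isEmpty) =
      (pvClassifyB (pvAvailSetB tc avail) prev sp (val, !inv.isEmpty || !inc.isEmpty)).2 := by
  induction sp generalizing inv val inc with
  | nil => exact ⟨rfl, rfl⟩
  | cons p rest ih =>
    simp only [pvClassifyA, pvClassifyB, List.foldl_cons]
    rw [PySem.Dict.contains_eq_isSome_get?]
    cases h : pvVALID.get? p with
    | none =>
      simpa [pvClassifyB, isEmpty_append_singleton] using ih (inv ++ [p]) val inc
    | some sname =>
      simp only [Option.isSome_some, Bool.not_true, Bool.false_eq_true, if_false,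
        Bool.not_false, if_true]
      rw [← avail_eq p sname h tc avail]
      by_cases ha : pvAvailLoopA sname tc avail = true
      · simp only [ha, if_true, Bool.true_or]
        simpa [pvClassifyB] using ih inv (val ++ [p]) inc
      · simp only [Bool.not_eq_true] at ha
        simp only [ha, Bool.false_eq_true, if_false, Bool.false_or]
        by_cases hp : prev.contains p = true
        · simp only [hp, if_true]
          simpa [pvClassifyB] using ih inv (val ++ [p]) inc
        · simp only [Bool.not_eq_true] at hp
          simp only [hp, Bool.false_eq_true, if_false]
          simpa [pvClassifyB, isEmpty_append_singleton] using ih inv val (inc ++ [p])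

theorem stepA_eq (s : String) (d : List String) :
    pvVALID.items.foldl (fun acc pr =>
      if s == pr.2 then (if acc.contains pr.1 then acc else acc ++ [pr.1]) else acc) d =
    (match pvSTP.get? s with
     | some p => if d.contains p then d else d ++ [p]
     | none => d) := by
  by_cases h1 : s = "balancer_pools_search" <;>
  by_cases h2 : s = "uniswap_pools_search" <;>
  by_cases h3 : s = "velodrome_pools_search" <;>
  by_cases h4 : s = "asset_lending" <;>
  first
  | (subst_vars; simp [pvVALID, pvSTP, PySem.Dict.items, PySem.Dict.get?, List.foldl, List.find?]; done)
  | (have g1 : ¬"balancer_pools_search" = s := fun h => h1 h.symm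
     have g2 : ¬"uniswap_pools_search" = s := fun h => h2 h.symm
     have g3 : ¬"velodrome_pools_search" = s := fun h => h3 h.symm
     have g4 : ¬"asset_lending" = s := fun h => h4 h.symm
     simp [pvVALID, pvSTP, PySem.Dict.items, PySem.Dict.get?, List.foldl, List.find?,
           h1, h2, h3, h4, g1, g2, g3, g4]
     have b1 : ("balancer_pools_search" == s) = false := beq_eq_false_iff_ne.mpr g1
     have b2 : ("uniswap_pools_search" == s) = false := beq_eq_false_iff_ne.mpr g2
     have b3 : ("velodrome_pools_search" == s) = false := beq_eq_false_iff_ne.mpr g3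
     have b4 : ("asset_lending" == s) = false := beq_eq_false_iff_ne.mpr g4
     simp [b1, b2, b3, b4])

theorem contains_eq_of_iff (seen : PySem.Set String) (d : List String)
    (hs : ∀ x, x ∈ seen ↔ x ∈ d) (p : String) : seen.contains p = d.contains p := by
  rw [Bool.eq_iff_iff, PySem.Set.contains_iff, List.contains_iff_mem, hs]

theorem inner_rel (cs : List String) (d : List String) (seen : PySem.Set String)
    (hs : ∀ x, x ∈ seen ↔ x ∈ d) :
    (cs.foldl (fun acc s =>
        match pvSTP.get? s with
        | some p => if acc.contains p then acc else acc ++ [p]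
        | none => acc) d =
      (cs.foldl (fun (st : PySem.Set String × List String) strat =>
        match pvSTP.get? strat with
        | some p => if st.1.contains p then st else (PySem.Set.add st.1 p, st.2 ++ [p])
        | none => st) (seen, d)).2) ∧
    ∀ x, x ∈ (cs.foldl (fun (st : PySem.Set String × List String) strat =>
        match pvSTP.get? strat with
        | some p => if st.1.contains p then st else (PySem.Set.add st.1 p, st.2 ++ [p])
        | none => st) (seen, d)).1 ↔
      x ∈ cs.foldl (fun acc s =>
        match pvSTP.get? s with
        | some p => if acc.contains p then acc else acc ++ [p]
        | none => acc) d := by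
  induction cs generalizing d seen with
  | nil => exact ⟨rfl, hs⟩
  | cons s rest ih =>
    simp only [List.foldl_cons]
    cases h : pvSTP.get? s with
    | none => exact ih d seen hs
    | some p =>
      simp only [contains_eq_of_iff seen d hs]
      by_cases hc : d.contains p = true
      · simp only [hc, if_true]
        exact ih d seen hs
      · simp only [Bool.not_eq_true] at hc
        simp only [hc, Bool.false_eq_true, if_false]
        refine ih (d ++ [p]) (PySem.Set.add seen p) ?_
        intro x
        rw [PySem.Set.mem_add, List.mem_append, hs, List.mem_singleton]

theorem defaults_eq (tc : List String) (avail : List (String × List String)) :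
    pvDefaultsA tc avail = pvDefaultsB tc avail := by
  unfold pvDefaultsA pvDefaultsB
  simp only [stepA_eq]
  suffices h : ∀ (d : List String) (seen : PySem.Set String), (∀ x, x ∈ seen ↔ x ∈ d) →
      (tc.foldl (fun acc chain =>
        match List.lookup chain avail with
        | none => acc
        | some cs =>
          cs.foldl (fun acc s =>
            match pvSTP.get? s with
            | some p => if acc.contains p then acc else acc ++ [p]
            | none => acc) acc) d =
      (tc.foldl (fun st chain =>
        ((List.lookup chain avail).getD []).foldl (fun (st : PySem.Set String × List String) strat =>
          match pvSTP.get? strat with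
          | some p => if st.1.contains p then st else (PySem.Set.add st.1 p, st.2 ++ [p])
          | none => st) st) (seen, d)).2) ∧
      ∀ x, x ∈ (tc.foldl (fun st chain =>
        ((List.lookup chain avail).getD []).foldl (fun (st : PySem.Set String × List String) strat =>
          match pvSTP.get? strat with
          | some p => if st.1.contains p then st else (PySem.Set.add st.1 p, st.2 ++ [p])
          | none => st) st) (seen, d)).1 ↔
        x ∈ tc.foldl (fun acc chain =>
        match List.lookup chain avail with
        | none => acc
        | some cs =>
          cs.foldl (fun acc s =>
            match pvSTP.get? s with
            | some p => if acc.contains p then acc else acc ++ [p]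
            | none => acc) acc) d by
    exact (h [] PySem.Set.empty (by simp [PySem.Set.empty])).1
  induction tc with
  | nil => exact fun d seen hs => ⟨rfl, hs⟩
  | cons c rest ih =>
    intro d seen hs
    simp only [List.foldl_cons]
    cases hl : List.lookup c avail with
    | none => exact ih d seen hs
    | some cs =>
      simp only [Option.getD_some]
      obtain ⟨h1, h2⟩ := inner_rel cs d seen hs
      rw [h1] at h2 ⊢
      exact ih _ _ h2

-- ===== VERDICT (by name: the statement is the Claim_ definition above) =====
theorem validate_and_fix_protocols_spec : Claim_equal_validate_and_fix_protocols := by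
  intro sp tc av pp _
  unfold Spec_validate_and_fix_protocols
  simp only [validate_and_fix_protocols, validate_and_fix_protocols_alt, prevSet_eq]
  obtain ⟨h1, h2⟩ := classify_rel tc av (PySem.Set.ofList (pp.getD [])) sp [] [] []
  rw [show (!(([] : List String)).isEmpty || !(([] : List String)).isEmpty) = false from rfl] at h1 h2
  rw [h1, h2, defaults_eq]
  cases hb : (pvClassifyB (pvAvailSetB tc av) (PySem.Set.ofList (pp.getD [])) sp ([], false)).2 <;>
  cases hv : (pvClassifyB (pvAvailSetB tc av) (PySem.Set.ofList (pp.getD [])) sp ([], false)).1.isEmpty <;>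
  simp [hb, hv]
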